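-- pv_equiv track=rewrite | github.com/Dressingoak/adventofcode | 2024/dec12/solution.py | set_to_grid
-- ===== SOURCE A (Python) =====
-- def set_to_grid(points: set):
--     arr = []
--     i1, i2 = min(i for i, _ in points), max(i for i, _ in points) + 1
--     j1, j2 = min(j for _, j in points), max(j for _, j in points) + 1
--     for i in range(i1, i2):
--         arr.append([(i, j) in points for j in range(j1, j2)])
--     n = len(arr)
--     m = len(arr[0])
--     rows = []
--     for i in range(len(arr) + 1):
--         row = []
--         for j in range(m + 1):
--             row.append(
--                 (
--                     arr[i - 1][j - 1] if (i > 0 and j > 0) else False,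
--                     arr[i - 1][j] if (i > 0 and j < m) else False,
--                     arr[i][j - 1] if (i < n and j > 0) else False,
--                     arr[i][j] if (i < n and j < m) else False,
--                 )
--             )
--         rows.append(row)
--     return rows
-- ===== SOURCE B (Python) =====
-- def set_to_grid(points: set):
--     i1 = min(i for i, _ in points)
--     i2 = max(i for i, _ in points) + 1
--     j1 = min(j for _, j in points)
--     j2 = max(j for _, j in points) + 1
--     n, m = i2 - i1, j2 - j1
--     # start from an all-False grid and scatter: each point contributes one
--     # quadrant flag to each of the four cells whose 2x2 window covers it
--     grid = [[[False, False, False, False] for _ in range(m + 1)] for _ in range(n + 1)]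
--     for (pi, pj) in points:
--         r, c = pi - i1, pj - j1
--         grid[r][c][3] = True
--         grid[r][c + 1][2] = True
--         grid[r + 1][c][1] = True
--         grid[r + 1][c + 1][0] = True
--     return [[tuple(cell) for cell in row] for row in grid]
-- ===== Notes on version B (the rewrite author's own statement) =====
-- stated objective: alternative
-- what changed: B inverts the strategy: instead of A's gather (build a bounding-box boolean grid, then for every output cell look up its four neighbours with bounds guards), B starts from an all-False (n+1)x(m+1) grid and makes a single scatter pass over the points, each point setting the one quadrant flag in each of the four cells whose 2x2 window covers it; Pre_ excludes the empty set, on which A raises ValueError (min of empty sequence).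
import Mathlib
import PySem

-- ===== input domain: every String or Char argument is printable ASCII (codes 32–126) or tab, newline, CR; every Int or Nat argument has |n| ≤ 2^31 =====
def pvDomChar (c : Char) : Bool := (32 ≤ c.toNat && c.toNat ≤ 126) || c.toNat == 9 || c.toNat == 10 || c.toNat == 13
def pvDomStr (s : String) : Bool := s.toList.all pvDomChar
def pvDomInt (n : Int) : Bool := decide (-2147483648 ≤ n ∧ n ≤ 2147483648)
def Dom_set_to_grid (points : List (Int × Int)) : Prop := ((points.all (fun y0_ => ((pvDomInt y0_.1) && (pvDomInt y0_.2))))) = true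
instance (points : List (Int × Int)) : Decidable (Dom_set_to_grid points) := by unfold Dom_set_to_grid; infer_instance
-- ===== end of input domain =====

-- B replaces A's gather (per-cell lookups in an intermediate bounding-box boolean grid) by a
-- single scatter pass: it starts from an all-False grid and, for each point, sets the one
-- quadrant flag in each of the four cells whose 2x2 window covers that point (objective:
-- alternative); Pre_ excludes the empty list, on which Python A raises ValueError.


-- ===== PORT A =====
def set_to_grid (points : List (Int × Int)) : List (List (Bool × Bool × Bool × Bool)) :=
  let i1 : Int := (PySem.List.min? (points.map Prod.fst) (fun x => x)).getD 0
  let i2 : Int := (PySem.List.max? (points.map Prod.fst) (fun x => x)).getD 0 + 1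
  let j1 : Int := (PySem.List.min? (points.map Prod.snd) (fun x => x)).getD 0
  let j2 : Int := (PySem.List.max? (points.map Prod.snd) (fun x => x)).getD 0 + 1
  let arr := (PySem.List.pyRange i1 i2 1).map (fun i =>
    (PySem.List.pyRange j1 j2 1).map (fun j => decide ((i, j) ∈ points)))
  let n : Int := arr.length
  let m : Int := (PySem.List.pyGetD arr 0 []).length   -- arr[0]; in range since Pre_ makes arr nonempty
  (PySem.List.pyRange 0 (n + 1) 1).map (fun i =>
    (PySem.List.pyRange 0 (m + 1) 1).map (fun j =>
      ((if i > 0 ∧ j > 0 then PySem.List.pyGetD (PySem.List.pyGetD arr (i - 1) []) (j - 1) false else false),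
       (if i > 0 ∧ j < m then PySem.List.pyGetD (PySem.List.pyGetD arr (i - 1) []) j false else false),
       (if i < n ∧ j > 0 then PySem.List.pyGetD (PySem.List.pyGetD arr i []) (j - 1) false else false),
       (if i < n ∧ j < m then PySem.List.pyGetD (PySem.List.pyGetD arr i []) j false else false))))

-- ===== PORT B =====
-- the all-False cell [False, False, False, False]
def pvQ0 : Bool × Bool × Bool × Bool := (false, false, false, false)

-- grid[r][c] = f(grid[r][c]) : replace row r by the row with entry c updated
def pvCellUpd (g : List (List (Bool × Bool × Bool × Bool))) (r c : Int)
    (f : Bool × Bool × Bool × Bool → Bool × Bool × Bool × Bool) :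
    List (List (Bool × Bool × Bool × Bool)) :=
  PySem.List.pySetD g r
    (PySem.List.pySetD (PySem.List.pyGetD g r []) c
      (f (PySem.List.pyGetD (PySem.List.pyGetD g r []) c pvQ0)))

-- the body of B's loop over points: scatter one point into its four covering windows
def pvStep (i1 j1 : Int) (g : List (List (Bool × Bool × Bool × Bool))) (p : Int × Int) :
    List (List (Bool × Bool × Bool × Bool)) :=
  let r := p.1 - i1
  let c := p.2 - j1
  let g := pvCellUpd g r c (fun q => (q.1, q.2.1, q.2.2.1, true))
  let g := pvCellUpd g r (c + 1) (fun q => (q.1, q.2.1, true, q.2.2.2))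
  let g := pvCellUpd g (r + 1) c (fun q => (q.1, true, q.2.2.1, q.2.2.2))
  pvCellUpd g (r + 1) (c + 1) (fun q => (true, q.2.1, q.2.2.1, q.2.2.2))

def set_to_grid_alt (points : List (Int × Int)) : List (List (Bool × Bool × Bool × Bool)) :=
  let i1 : Int := (PySem.List.min? (points.map Prod.fst) (fun x => x)).getD 0
  let i2 : Int := (PySem.List.max? (points.map Prod.fst) (fun x => x)).getD 0 + 1
  let j1 : Int := (PySem.List.min? (points.map Prod.snd) (fun x => x)).getD 0
  let j2 : Int := (PySem.List.max? (points.map Prod.snd) (fun x => x)).getD 0 + 1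
  let n : Int := i2 - i1
  let m : Int := j2 - j1
  let grid0 := (PySem.List.pyRange 0 (n + 1) 1).map (fun _ =>
    (PySem.List.pyRange 0 (m + 1) 1).map (fun _ => pvQ0))
  let grid := points.foldl (pvStep i1 j1) grid0
  grid.map (fun row => row.map (fun cell => cell))   -- [[tuple(cell) for cell in row] for row in grid]

-- ===== PRECONDITION & SPEC =====
-- Pre_ excludes exactly the empty set, on which A raises ValueError (min() of empty sequence).
def Pre_set_to_grid (points : List (Int × Int)) : Prop := points ≠ []
instance (points : List (Int × Int)) : Decidable (Pre_set_to_grid points) := by unfold Pre_set_to_grid; infer_instance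
def pvWitness_set_to_grid : (List (Int × Int)) := [((0 : Int), (0 : Int))]
def Spec_set_to_grid (points : List (Int × Int)) (out : List (List (Bool × Bool × Bool × Bool))) : Prop := out = set_to_grid_alt points
instance (points : List (Int × Int)) (out : List (List (Bool × Bool × Bool × Bool))) : Decidable (Spec_set_to_grid points out) := by unfold Spec_set_to_grid; infer_instance

-- ===== CLAIM (what is proved, stated in full; the proofs are below) =====
def Claim_equal_set_to_grid : Prop := ∀ (points : List (Int × Int)), Dom_set_to_grid points → Pre_set_to_grid points → Spec_set_to_grid points (set_to_grid points)

-- ===== LEMMAS AND PROOFS =====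

-- the common gather form both ports are reduced to: cell (i,j) lists the four surrounding points
def gatherGrid (points : List (Int × Int)) (a b c d : Int) :
    List (List (Bool × Bool × Bool × Bool)) :=
  (PySem.List.pyRange 0 (b + 1 - a + 1) 1).map (fun i =>
    (PySem.List.pyRange 0 (d + 1 - c + 1) 1).map (fun j =>
      (decide ((a + i - 1, c + j - 1) ∈ points),
       decide ((a + i - 1, c + j) ∈ points),
       decide ((a + i, c + j - 1) ∈ points),
       decide ((a + i, c + j) ∈ points))))

-- indexing a comprehension over a range, with an Int index
theorem pyGetD_map_pyRange_one_int {α : Type} (f : Int → α) (a b t : Int) (d : α)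
    (h0 : 0 ≤ t) (h1 : t < b - a) :
    PySem.List.pyGetD ((PySem.List.pyRange a b 1).map f) t d = f (a + t) := by
  rw [PySem.List.pyGetD_eq_getElem _ d h0
      (by simp [PySem.List.length_pyRange_one]; omega)]
  rw [List.getElem_map]
  rw [PySem.List.getElem_pyRange_one]
  congr 1
  omega

theorem set_to_grid_eq_gather (points : List (Int × Int)) (a b c d : Int)
    (h1 : PySem.List.min? (points.map Prod.fst) (fun x => x) = some a)
    (h2 : PySem.List.max? (points.map Prod.fst) (fun x => x) = some b)
    (h3 : PySem.List.min? (points.map Prod.snd) (fun x => x) = some c)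
    (h4 : PySem.List.max? (points.map Prod.snd) (fun x => x) = some d) :
    set_to_grid points = gatherGrid points a b c d := by
  -- bounds: every point lies in [a,b] × [c,d]
  have hb1 : ∀ p ∈ points, a ≤ p.1 ∧ p.1 ≤ b ∧ c ≤ p.2 ∧ p.2 ≤ d := by
    intro p hp
    exact ⟨PySem.List.min?_isMin h1 p.1 (List.mem_map_of_mem hp),
           PySem.List.max?_isMax h2 p.1 (List.mem_map_of_mem hp),
           PySem.List.min?_isMin h3 p.2 (List.mem_map_of_mem hp),
           PySem.List.max?_isMax h4 p.2 (List.mem_map_of_mem hp)⟩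
  have hab : a ≤ b := by
    obtain ⟨x, hx, hxa⟩ := List.mem_map.mp (PySem.List.min?_mem h1)
    have := hb1 x hx; omega
  have hcd : c ≤ d := by
    obtain ⟨x, hx, hxc⟩ := List.mem_map.mp (PySem.List.min?_mem h3)
    have := hb1 x hx; omega
  simp only [set_to_grid, gatherGrid, h1, h2, h3, h4, Option.getD_some]
  set arr : List (List Bool) :=
    (PySem.List.pyRange a (b + 1) 1).map (fun i =>
      (PySem.List.pyRange c (d + 1) 1).map (fun j => decide ((i, j) ∈ points))) with harr
  have hlen : (arr.length : Int) = b + 1 - a := by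
    simp [harr, PySem.List.length_pyRange_one]; omega
  have hrow : ∀ t : Int, 0 ≤ t → t < b + 1 - a →
      PySem.List.pyGetD arr t [] =
        (PySem.List.pyRange c (d + 1) 1).map (fun j => decide ((a + t, j) ∈ points)) := by
    intro t ht0 ht1
    rw [harr, pyGetD_map_pyRange_one_int _ a (b+1) t [] ht0 (by omega)]
  have hm : ((PySem.List.pyGetD arr 0 []).length : Int) = d + 1 - c := by
    rw [hrow 0 le_rfl (by omega)]
    simp [PySem.List.length_pyRange_one]; omega
  have hnotmem : ∀ x y : Int, (x < a ∨ b < x ∨ y < c ∨ d < y) → (x, y) ∉ points := by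
    intro x y h hmem
    have := hb1 (x, y) hmem
    simp only at this; omega
  rw [hlen, hm]
  apply List.map_congr_left
  intro i hi
  rw [PySem.List.mem_pyRange_one] at hi
  apply List.map_congr_left
  intro j hj
  rw [PySem.List.mem_pyRange_one] at hj
  have hcell : ∀ s t : Int, 0 ≤ s → s < b + 1 - a → 0 ≤ t → t < d + 1 - c →
      PySem.List.pyGetD (PySem.List.pyGetD arr s []) t false = decide ((a + s, c + t) ∈ points) := by
    intro s t hs0 hs1 ht0 ht1
    rw [hrow s hs0 hs1, pyGetD_map_pyRange_one_int _ c (d+1) t false ht0 (by omega)]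
  refine Prod.ext ?_ (Prod.ext ?_ (Prod.ext ?_ ?_)) <;> simp only
  · split_ifs with h
    · rw [hcell (i-1) (j-1) (by omega) (by omega) (by omega) (by omega)]
      have e1 : a + (i - 1) = a + i - 1 := by ring
      have e2 : c + (j - 1) = c + j - 1 := by ring
      rw [e1, e2]
    · have hnm : (a + i - 1, c + j - 1) ∉ points := hnotmem _ _ (by omega)
      simp [hnm]
  · split_ifs with h
    · rw [hcell (i-1) j (by omega) (by omega) (by omega) (by omega)]
      have e1 : a + (i - 1) = a + i - 1 := by ring
      rw [e1]
    · have hnm : (a + i - 1, c + j) ∉ points := hnotmem _ _ (by omega)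
      simp [hnm]
  · split_ifs with h
    · rw [hcell i (j-1) (by omega) (by omega) (by omega) (by omega)]
      have e2 : c + (j - 1) = c + j - 1 := by ring
      rw [e2]
    · have hnm : (a + i, c + j - 1) ∉ points := hnotmem _ _ (by omega)
      simp [hnm]
  · split_ifs with h
    · rw [hcell i j (by omega) (by omega) (by omega) (by omega)]
    · have hnm : (a + i, c + j) ∉ points := hnotmem _ _ (by omega)
      simp [hnm]

-- ===== B-side lemmas =====

theorem len_setD {α : Type} (xs : List α) (i : Int) (v : α) :
    (PySem.List.pySetD xs i v).length = xs.length := by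
  simp only [PySem.List.pySetD, PySem.List.pySet?, PySem.List.pyIdx?]
  split <;> split <;> simp

theorem getD_setD {α : Type} (xs : List α) (i j : Int) (v : α) (d : α)
    (hi0 : 0 ≤ i) (hil : i < xs.length) (hj0 : 0 ≤ j) (hjl : j < xs.length) :
    PySem.List.pyGetD (PySem.List.pySetD xs i v) j d =
      if j = i then v else PySem.List.pyGetD xs j d := by
  simp only [PySem.List.pySetD, PySem.List.pySet?, PySem.List.pyIdx?, if_pos hi0, if_pos hil,
    Option.map_some, Option.getD_some]
  rw [PySem.List.pyGetD_eq_getElem _ _ hj0 (by simp [List.length_set]; omega),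
      PySem.List.pyGetD_eq_getElem _ _ hj0 hjl]
  rw [List.getElem_set]
  split_ifs with h1 h2 h2 <;> first | rfl | omega

theorem mem_setD {α : Type} (xs : List α) (i : Int) (v y : α)
    (hy : y ∈ PySem.List.pySetD xs i v) : y ∈ xs ∨ y = v := by
  simp only [PySem.List.pySetD, PySem.List.pySet?, PySem.List.pyIdx?] at hy
  split at hy <;> split at hy <;>
    simp only [Option.map_some, Option.map_none, Option.getD_some, Option.getD_none] at hy <;>
    first
      | exact (List.mem_or_eq_of_mem_set hy).imp id id
      | exact Or.inl hy

def pvRead (g : List (List (Bool × Bool × Bool × Bool))) (i j : Int) :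
    Bool × Bool × Bool × Bool :=
  PySem.List.pyGetD (PySem.List.pyGetD g i []) j pvQ0

def pvShape (g : List (List (Bool × Bool × Bool × Bool))) (n m : Int) : Prop :=
  ((g.length : Int) = n + 1) ∧ ∀ row ∈ g, ((row.length : Int) = m + 1)

theorem row_mem_of_range (g : List (List (Bool × Bool × Bool × Bool))) (r : Int)
    (hr0 : 0 ≤ r) (hrl : r < (g.length : Int)) :
    PySem.List.pyGetD g r [] ∈ g := by
  rw [PySem.List.pyGetD_eq_getElem _ _ hr0 hrl]
  exact List.getElem_mem _

theorem cellUpd_shape (g : List (List (Bool × Bool × Bool × Bool))) (n m r c : Int)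
    (f : Bool × Bool × Bool × Bool → Bool × Bool × Bool × Bool)
    (hs : pvShape g n m) (hr0 : 0 ≤ r) (hr1 : r < n + 1) :
    pvShape (pvCellUpd g r c f) n m := by
  obtain ⟨hl, hrows⟩ := hs
  refine ⟨by rw [pvCellUpd, Int.natCast_inj.mpr (len_setD ..)]; exact hl, ?_⟩
  intro row hrow
  rcases mem_setD _ _ _ _ hrow with h | h
  · exact hrows row h
  · subst h
    rw [Int.natCast_inj.mpr (len_setD ..)]
    exact hrows _ (row_mem_of_range g r hr0 (by omega))

theorem read_cellUpd (g : List (List (Bool × Bool × Bool × Bool))) (n m r c i j : Int)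
    (f : Bool × Bool × Bool × Bool → Bool × Bool × Bool × Bool)
    (hs : pvShape g n m) (hr0 : 0 ≤ r) (hr1 : r < n + 1) (hc0 : 0 ≤ c) (hc1 : c < m + 1)
    (hi0 : 0 ≤ i) (hi1 : i < n + 1) (hj0 : 0 ≤ j) (hj1 : j < m + 1) :
    pvRead (pvCellUpd g r c f) i j =
      if i = r ∧ j = c then f (pvRead g r c) else pvRead g i j := by
  obtain ⟨hl, hrows⟩ := hs
  have hrowlen : ((PySem.List.pyGetD g r []).length : Int) = m + 1 :=
    hrows _ (row_mem_of_range g r hr0 (by omega))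
  unfold pvCellUpd pvRead
  rw [getD_setD g r i _ [] hr0 (by omega) hi0 (by omega)]
  by_cases hir : i = r
  · subst hir
    simp only [true_and, if_true]
    rw [getD_setD (PySem.List.pyGetD g i []) c j _ pvQ0 hc0 (by omega) hj0 (by omega)]
  · rw [if_neg hir, if_neg (by rintro ⟨h, _⟩; exact hir h)]

theorem step_shape (g : List (List (Bool × Bool × Bool × Bool))) (n m lo1 lo2 : Int)
    (p : Int × Int) (hs : pvShape g n m)
    (hp1 : 0 ≤ p.1 - lo1) (hp2 : p.1 - lo1 < n) (hp3 : 0 ≤ p.2 - lo2) (hp4 : p.2 - lo2 < m) :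
    pvShape (pvStep lo1 lo2 g p) n m := by
  unfold pvStep
  apply cellUpd_shape _ _ _ _ _ _ _ (by omega) (by omega)
  apply cellUpd_shape _ _ _ _ _ _ _ (by omega) (by omega)
  apply cellUpd_shape _ _ _ _ _ _ _ (by omega) (by omega)
  exact cellUpd_shape _ _ _ _ _ _ hs (by omega) (by omega)

theorem step_read (g : List (List (Bool × Bool × Bool × Bool))) (n m lo1 lo2 : Int)
    (p : Int × Int) (i j : Int) (hs : pvShape g n m)
    (hp1 : 0 ≤ p.1 - lo1) (hp2 : p.1 - lo1 < n) (hp3 : 0 ≤ p.2 - lo2) (hp4 : p.2 - lo2 < m)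
    (hi0 : 0 ≤ i) (hi1 : i < n + 1) (hj0 : 0 ≤ j) (hj1 : j < m + 1) :
    pvRead (pvStep lo1 lo2 g p) i j =
      ((pvRead g i j).1 || decide ((lo1 + i - 1, lo2 + j - 1) = p),
       (pvRead g i j).2.1 || decide ((lo1 + i - 1, lo2 + j) = p),
       (pvRead g i j).2.2.1 || decide ((lo1 + i, lo2 + j - 1) = p),
       (pvRead g i j).2.2.2 || decide ((lo1 + i, lo2 + j) = p)) := by
  obtain ⟨p1, p2⟩ := p
  simp only at hp1 hp2 hp3 hp4
  simp only [pvStep]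
  set u : Int := p1 - lo1 with hu
  set w : Int := p2 - lo2 with hw
  set g1 := pvCellUpd g u w (fun q => (q.1, q.2.1, q.2.2.1, true)) with hg1
  set g2 := pvCellUpd g1 u (w + 1) (fun q => (q.1, q.2.1, true, q.2.2.2)) with hg2
  set g3 := pvCellUpd g2 (u + 1) w (fun q => (q.1, true, q.2.2.1, q.2.2.2)) with hg3
  have s1 : pvShape g1 n m := cellUpd_shape _ _ _ _ _ _ hs (by omega) (by omega)
  have s2 : pvShape g2 n m := cellUpd_shape _ _ _ _ _ _ s1 (by omega) (by omega)
  have s3 : pvShape g3 n m := cellUpd_shape _ _ _ _ _ _ s2 (by omega) (by omega)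
  -- values at the four target cells fall through to g
  have e3 : pvRead g3 (u + 1) (w + 1) = pvRead g (u + 1) (w + 1) := by
    rw [hg3, read_cellUpd _ n m _ _ _ _ _ s2 (by omega) (by omega) (by omega) (by omega)
          (by omega) (by omega) (by omega) (by omega),
        if_neg (by rintro ⟨_, h⟩; omega),
        hg2, read_cellUpd _ n m _ _ _ _ _ s1 (by omega) (by omega) (by omega) (by omega)
          (by omega) (by omega) (by omega) (by omega),
        if_neg (by rintro ⟨h, _⟩; omega),
        hg1, read_cellUpd _ n m _ _ _ _ _ hs (by omega) (by omega) (by omega) (by omega)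
          (by omega) (by omega) (by omega) (by omega),
        if_neg (by rintro ⟨h, _⟩; omega)]
  have e2 : pvRead g2 (u + 1) w = pvRead g (u + 1) w := by
    rw [hg2, read_cellUpd _ n m _ _ _ _ _ s1 (by omega) (by omega) (by omega) (by omega)
          (by omega) (by omega) (by omega) (by omega),
        if_neg (by rintro ⟨h, _⟩; omega),
        hg1, read_cellUpd _ n m _ _ _ _ _ hs (by omega) (by omega) (by omega) (by omega)
          (by omega) (by omega) (by omega) (by omega),
        if_neg (by rintro ⟨h, _⟩; omega)]
  have e1 : pvRead g1 u (w + 1) = pvRead g u (w + 1) := by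
    rw [hg1, read_cellUpd _ n m _ _ _ _ _ hs (by omega) (by omega) (by omega) (by omega)
          (by omega) (by omega) (by omega) (by omega),
        if_neg (by rintro ⟨_, h⟩; omega)]
  rw [read_cellUpd _ n m _ _ _ _ _ s3 (by omega) (by omega) (by omega) (by omega)
        hi0 hi1 hj0 hj1, e3]
  rw [hg3, read_cellUpd _ n m _ _ _ _ _ s2 (by omega) (by omega) (by omega) (by omega)
        hi0 hi1 hj0 hj1, e2]
  rw [hg2, read_cellUpd _ n m _ _ _ _ _ s1 (by omega) (by omega) (by omega) (by omega)
        hi0 hi1 hj0 hj1, e1]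
  rw [hg1, read_cellUpd _ n m _ _ _ _ _ hs (by omega) (by omega) (by omega) (by omega)
        hi0 hi1 hj0 hj1]
  split_ifs with h1 h2 h3 h4
  · obtain ⟨hi', hj'⟩ := h1
    have c1 : ((lo1 + i - 1, lo2 + j - 1) : Int × Int) = (p1, p2) := by
      rw [show lo1 + i - 1 = p1 by omega, show lo2 + j - 1 = p2 by omega]
    have c2 : ((lo1 + i - 1, lo2 + j) : Int × Int) ≠ (p1, p2) := by
      rw [Ne, Prod.mk.injEq]; rintro ⟨_, h⟩; omega
    have c3 : ((lo1 + i, lo2 + j - 1) : Int × Int) ≠ (p1, p2) := by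
      rw [Ne, Prod.mk.injEq]; rintro ⟨h, _⟩; omega
    have c4 : ((lo1 + i, lo2 + j) : Int × Int) ≠ (p1, p2) := by
      rw [Ne, Prod.mk.injEq]; rintro ⟨h, _⟩; omega
    have hread : pvRead g i j = pvRead g (u + 1) (w + 1) := by rw [hi', hj']
    simp [hread, c1, c2, c3, c4]
  · obtain ⟨hi', hj'⟩ := h2
    have c1 : ((lo1 + i - 1, lo2 + j - 1) : Int × Int) ≠ (p1, p2) := by
      rw [Ne, Prod.mk.injEq]; rintro ⟨_, h⟩; omega
    have c2 : ((lo1 + i - 1, lo2 + j) : Int × Int) = (p1, p2) := by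
      rw [show lo1 + i - 1 = p1 by omega, show lo2 + j = p2 by omega]
    have c3 : ((lo1 + i, lo2 + j - 1) : Int × Int) ≠ (p1, p2) := by
      rw [Ne, Prod.mk.injEq]; rintro ⟨h, _⟩; omega
    have c4 : ((lo1 + i, lo2 + j) : Int × Int) ≠ (p1, p2) := by
      rw [Ne, Prod.mk.injEq]; rintro ⟨h, _⟩; omega
    have hread : pvRead g i j = pvRead g (u + 1) w := by rw [hi', hj']
    simp [hread, c1, c2, c3, c4]
  · obtain ⟨hi', hj'⟩ := h3
    have c1 : ((lo1 + i - 1, lo2 + j - 1) : Int × Int) ≠ (p1, p2) := by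
      rw [Ne, Prod.mk.injEq]; rintro ⟨h, _⟩; omega
    have c2 : ((lo1 + i - 1, lo2 + j) : Int × Int) ≠ (p1, p2) := by
      rw [Ne, Prod.mk.injEq]; rintro ⟨h, _⟩; omega
    have c3 : ((lo1 + i, lo2 + j - 1) : Int × Int) = (p1, p2) := by
      rw [show lo1 + i = p1 by omega, show lo2 + j - 1 = p2 by omega]
    have c4 : ((lo1 + i, lo2 + j) : Int × Int) ≠ (p1, p2) := by
      rw [Ne, Prod.mk.injEq]; rintro ⟨_, h⟩; omega
    have hread : pvRead g i j = pvRead g u (w + 1) := by rw [hi', hj']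
    simp [hread, c1, c2, c3, c4]
  · obtain ⟨hi', hj'⟩ := h4
    have c1 : ((lo1 + i - 1, lo2 + j - 1) : Int × Int) ≠ (p1, p2) := by
      rw [Ne, Prod.mk.injEq]; rintro ⟨h, _⟩; omega
    have c2 : ((lo1 + i - 1, lo2 + j) : Int × Int) ≠ (p1, p2) := by
      rw [Ne, Prod.mk.injEq]; rintro ⟨h, _⟩; omega
    have c3 : ((lo1 + i, lo2 + j - 1) : Int × Int) ≠ (p1, p2) := by
      rw [Ne, Prod.mk.injEq]; rintro ⟨_, h⟩; omega
    have c4 : ((lo1 + i, lo2 + j) : Int × Int) = (p1, p2) := by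
      rw [show lo1 + i = p1 by omega, show lo2 + j = p2 by omega]
    have hread : pvRead g i j = pvRead g u w := by rw [hi', hj']
    simp [hread, c1, c2, c3, c4]
  · have c1 : ((lo1 + i - 1, lo2 + j - 1) : Int × Int) ≠ (p1, p2) := by
      rw [Ne, Prod.mk.injEq]; rintro ⟨ha, hb⟩; exact h1 ⟨by omega, by omega⟩
    have c2 : ((lo1 + i - 1, lo2 + j) : Int × Int) ≠ (p1, p2) := by
      rw [Ne, Prod.mk.injEq]; rintro ⟨ha, hb⟩; exact h2 ⟨by omega, by omega⟩
    have c3 : ((lo1 + i, lo2 + j - 1) : Int × Int) ≠ (p1, p2) := by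
      rw [Ne, Prod.mk.injEq]; rintro ⟨ha, hb⟩; exact h3 ⟨by omega, by omega⟩
    have c4 : ((lo1 + i, lo2 + j) : Int × Int) ≠ (p1, p2) := by
      rw [Ne, Prod.mk.injEq]; rintro ⟨ha, hb⟩; exact h4 ⟨by omega, by omega⟩
    simp [c1, c2, c3, c4]

theorem fold_shape (ps : List (Int × Int)) (g : List (List (Bool × Bool × Bool × Bool)))
    (n m lo1 lo2 : Int) (hs : pvShape g n m)
    (hb : ∀ p ∈ ps, 0 ≤ p.1 - lo1 ∧ p.1 - lo1 < n ∧ 0 ≤ p.2 - lo2 ∧ p.2 - lo2 < m) :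
    pvShape (ps.foldl (pvStep lo1 lo2) g) n m := by
  induction ps generalizing g with
  | nil => exact hs
  | cons p t ih =>
    have hp := hb p List.mem_cons_self
    exact ih _ (step_shape _ _ _ _ _ _ hs hp.1 hp.2.1 hp.2.2.1 hp.2.2.2)
      (fun q hq => hb q (List.mem_cons_of_mem _ hq))

theorem fold_read (ps : List (Int × Int)) (g : List (List (Bool × Bool × Bool × Bool)))
    (n m lo1 lo2 : Int) (hs : pvShape g n m)
    (hb : ∀ p ∈ ps, 0 ≤ p.1 - lo1 ∧ p.1 - lo1 < n ∧ 0 ≤ p.2 - lo2 ∧ p.2 - lo2 < m)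
    (i j : Int) (hi0 : 0 ≤ i) (hi1 : i < n + 1) (hj0 : 0 ≤ j) (hj1 : j < m + 1) :
    pvRead (ps.foldl (pvStep lo1 lo2) g) i j =
      ((pvRead g i j).1 || decide ((lo1 + i - 1, lo2 + j - 1) ∈ ps),
       (pvRead g i j).2.1 || decide ((lo1 + i - 1, lo2 + j) ∈ ps),
       (pvRead g i j).2.2.1 || decide ((lo1 + i, lo2 + j - 1) ∈ ps),
       (pvRead g i j).2.2.2 || decide ((lo1 + i, lo2 + j) ∈ ps)) := by
  induction ps generalizing g with
  | nil => simp
  | cons p t ih =>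
    have hp := hb p List.mem_cons_self
    rw [List.foldl_cons,
        ih (pvStep lo1 lo2 g p)
          (step_shape _ _ _ _ _ _ hs hp.1 hp.2.1 hp.2.2.1 hp.2.2.2)
          (fun q hq => hb q (List.mem_cons_of_mem _ hq)),
        step_read _ n m _ _ _ _ _ hs hp.1 hp.2.1 hp.2.2.1 hp.2.2.2 hi0 hi1 hj0 hj1]
    simp [List.mem_cons, Bool.or_assoc]

theorem grid0_shape (n m : Int) (hn : 0 ≤ n) (hm : 0 ≤ m) :
    pvShape ((PySem.List.pyRange 0 (n + 1) 1).map (fun _ =>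
      (PySem.List.pyRange 0 (m + 1) 1).map (fun _ => pvQ0))) n m := by
  constructor
  · simp [PySem.List.length_pyRange_one]; omega
  · intro row hrow
    obtain ⟨_, _, hrow⟩ := List.mem_map.mp hrow
    rw [← hrow]
    simp [PySem.List.length_pyRange_one]; omega

theorem grid0_read (n m i j : Int) (hi0 : 0 ≤ i) (hi1 : i < n + 1) (hj0 : 0 ≤ j)
    (hj1 : j < m + 1) :
    pvRead ((PySem.List.pyRange 0 (n + 1) 1).map (fun _ =>
      (PySem.List.pyRange 0 (m + 1) 1).map (fun _ => pvQ0))) i j = pvQ0 := by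
  unfold pvRead
  rw [PySem.List.pyGetD_map_pyRange_of_nonneg _ _ _ _ hi0 hi1,
      PySem.List.pyGetD_map_pyRange_of_nonneg _ _ _ _ hj0 hj1]

theorem alt_eq_gather (points : List (Int × Int)) (a b c d : Int)
    (h1 : PySem.List.min? (points.map Prod.fst) (fun x => x) = some a)
    (h2 : PySem.List.max? (points.map Prod.fst) (fun x => x) = some b)
    (h3 : PySem.List.min? (points.map Prod.snd) (fun x => x) = some c)
    (h4 : PySem.List.max? (points.map Prod.snd) (fun x => x) = some d) :
    set_to_grid_alt points = gatherGrid points a b c d := by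
  have hb1 : ∀ p ∈ points, a ≤ p.1 ∧ p.1 ≤ b ∧ c ≤ p.2 ∧ p.2 ≤ d := by
    intro p hp
    exact ⟨PySem.List.min?_isMin h1 p.1 (List.mem_map_of_mem hp),
           PySem.List.max?_isMax h2 p.1 (List.mem_map_of_mem hp),
           PySem.List.min?_isMin h3 p.2 (List.mem_map_of_mem hp),
           PySem.List.max?_isMax h4 p.2 (List.mem_map_of_mem hp)⟩
  have hab : a ≤ b := by
    obtain ⟨x, hx, hxa⟩ := List.mem_map.mp (PySem.List.min?_mem h1)
    have := hb1 x hx; omega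
  have hcd : c ≤ d := by
    obtain ⟨x, hx, hxc⟩ := List.mem_map.mp (PySem.List.min?_mem h3)
    have := hb1 x hx; omega
  have hbounds : ∀ p ∈ points, 0 ≤ p.1 - a ∧ p.1 - a < b + 1 - a ∧
      0 ≤ p.2 - c ∧ p.2 - c < d + 1 - c := by
    intro p hp; have := hb1 p hp; omega
  simp only [set_to_grid_alt, h1, h2, h3, h4, Option.getD_some, List.map_id']
  set n : Int := b + 1 - a with hn
  set m : Int := d + 1 - c with hm
  set grid0 := (PySem.List.pyRange 0 (n + 1) 1).map (fun _ =>
    (PySem.List.pyRange 0 (m + 1) 1).map (fun _ => pvQ0)) with hgrid0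
  have hs0 : pvShape grid0 n m := grid0_shape n m (by omega) (by omega)
  have hsf : pvShape (points.foldl (pvStep a c) grid0) n m :=
    fold_shape _ _ _ _ _ _ hs0 hbounds
  apply List.ext_getElem
  · have := hsf.1
    simp only [gatherGrid]
    simp [PySem.List.length_pyRange_one]
    omega
  · intro k hk1 hk2
    have hkI : (k : Int) < n + 1 := by
      have := hsf.1; omega
    have hrowmem : (points.foldl (pvStep a c) grid0)[k] ∈ points.foldl (pvStep a c) grid0 :=
      List.getElem_mem _
    have hrowlen : (((points.foldl (pvStep a c) grid0)[k]).length : Int) = m + 1 :=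
      hsf.2 _ hrowmem
    have hk2' : k < (PySem.List.pyRange 0 (n + 1) 1).length := by
      simp [PySem.List.length_pyRange_one]; omega
    have hgather_row : (gatherGrid points a b c d)[k]'hk2 =
        (PySem.List.pyRange 0 (m + 1) 1).map (fun j =>
          (decide ((a + ((0 : Int) + (k : Int)) - 1, c + j - 1) ∈ points),
           decide ((a + ((0 : Int) + (k : Int)) - 1, c + j) ∈ points),
           decide ((a + ((0 : Int) + (k : Int)), c + j - 1) ∈ points),
           decide ((a + ((0 : Int) + (k : Int)), c + j) ∈ points))) := by
      simp only [gatherGrid]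
      rw [List.getElem_map, PySem.List.getElem_pyRange_one]
    rw [hgather_row]
    apply List.ext_getElem
    · simp [PySem.List.length_pyRange_one]
      omega
    · intro l hl1 hl2
      have hlI : (l : Int) < m + 1 := by
        have := hrowlen; omega
      have hcell : pvRead (points.foldl (pvStep a c) grid0) (k : Int) (l : Int) =
          ((decide ((a + (k : Int) - 1, c + (l : Int) - 1) ∈ points)),
           (decide ((a + (k : Int) - 1, c + (l : Int)) ∈ points)),
           (decide ((a + (k : Int), c + (l : Int) - 1) ∈ points)),
           (decide ((a + (k : Int), c + (l : Int)) ∈ points))) := by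
        rw [fold_read _ _ n m a c hs0 hbounds _ _ (by omega) hkI (by omega) hlI,
            grid0_read n m _ _ (by omega) hkI (by omega) hlI]
        simp [pvQ0]
      have hrowq : PySem.List.pyGetD (points.foldl (pvStep a c) grid0) (k : Int) [] =
          (points.foldl (pvStep a c) grid0)[k]'hk1 := by
        rw [PySem.List.pyGetD_eq_getElem _ _ (by omega) (by have := hsf.1; omega)]
        simp
      have hread_elem : pvRead (points.foldl (pvStep a c) grid0) (k : Int) (l : Int) =
          ((points.foldl (pvStep a c) grid0)[k]'hk1)[l]'hl1 := by
        unfold pvRead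
        rw [hrowq]
        rw [PySem.List.pyGetD_eq_getElem _ _ (by omega) (by exact_mod_cast hl1)]
        simp
      rw [← hread_elem, hcell]
      rw [List.getElem_map, PySem.List.getElem_pyRange_one]
      simp

-- main equivalence for nonempty input: both ports equal the gather form
theorem set_to_grid_spec_aux (points : List (Int × Int)) (hpre : points ≠ []) :
    set_to_grid points = set_to_grid_alt points := by
  have hne : points.map Prod.fst ≠ [] := by simpa using hpre
  have hne2 : points.map Prod.snd ≠ [] := by simpa using hpre
  obtain ⟨a, h1⟩ : ∃ a, PySem.List.min? (points.map Prod.fst) (fun x => x) = some a := by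
    cases hc : PySem.List.min? (points.map Prod.fst) (fun x => x) with
    | none => exact absurd ((PySem.List.min?_eq_none_iff _ _).mp hc) hne
    | some a => exact ⟨a, rfl⟩
  obtain ⟨b, h2⟩ : ∃ b, PySem.List.max? (points.map Prod.fst) (fun x => x) = some b := by
    cases hc : PySem.List.max? (points.map Prod.fst) (fun x => x) with
    | none => exact absurd ((PySem.List.max?_eq_none_iff _ _).mp hc) hne
    | some b => exact ⟨b, rfl⟩
  obtain ⟨c, h3⟩ : ∃ c, PySem.List.min? (points.map Prod.snd) (fun x => x) = some c := by
    cases hc : PySem.List.min? (points.map Prod.snd) (fun x => x) with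
    | none => exact absurd ((PySem.List.min?_eq_none_iff _ _).mp hc) hne2
    | some c => exact ⟨c, rfl⟩
  obtain ⟨e, h4⟩ : ∃ e, PySem.List.max? (points.map Prod.snd) (fun x => x) = some e := by
    cases hc : PySem.List.max? (points.map Prod.snd) (fun x => x) with
    | none => exact absurd ((PySem.List.max?_eq_none_iff _ _).mp hc) hne2
    | some e => exact ⟨e, rfl⟩
  rw [set_to_grid_eq_gather points a b c e h1 h2 h3 h4,
      alt_eq_gather points a b c e h1 h2 h3 h4]

-- ===== VERDICT (by name: the statement is the Claim_ definition above) =====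
theorem set_to_grid_spec : Claim_equal_set_to_grid := by
  intro points _ hpre
  exact set_to_grid_spec_aux points hpre
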